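-- pv_equiv track=rewrite | github.com/0rphon/Swept | Sweeper.py | ExploitMedium
-- ===== SOURCE A (Python) =====
-- def ExploitMedium(result,cords):
--     times=0
--     p=True
--     board=[]
--     #format board data
--     for x in result:
--         if times==17 and p==True:
--             p=False
--             times=0
--         elif times==15 and p==False:
--             times=0
--             p=True
--         #structure useful board data
--         if p==True:
--             if MapBoard(x)!="?":
--                 board.append(MapBoard(x))
--         times+=1
--     #return processed board data
--     return board
--
-- def MapBoard(value):
--     if value==143:return"B"
--     elif value==15:return"X"
--     else: return "?"
-- ===== SOURCE B (Python) =====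
-- def MapBoard(value):
--     if value==143:return"B"
--     elif value==15:return"X"
--     else: return "?"
--
-- def ExploitMedium(result, cords):
--     board = []
--     for i, x in enumerate(result):
--         if i % 32 < 17:
--             m = MapBoard(x)
--             if m != "?":
--                 board.append(m)
--     return board
-- ===== Notes on version B (the rewrite author's own statement) =====
-- stated objective: simpler
-- what changed: Replaces A's stateful times/p toggle machine with a stateless positional test: element i is considered exactly when i % 32 < 17, and MapBoard is computed once per kept element.
import Mathlib
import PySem

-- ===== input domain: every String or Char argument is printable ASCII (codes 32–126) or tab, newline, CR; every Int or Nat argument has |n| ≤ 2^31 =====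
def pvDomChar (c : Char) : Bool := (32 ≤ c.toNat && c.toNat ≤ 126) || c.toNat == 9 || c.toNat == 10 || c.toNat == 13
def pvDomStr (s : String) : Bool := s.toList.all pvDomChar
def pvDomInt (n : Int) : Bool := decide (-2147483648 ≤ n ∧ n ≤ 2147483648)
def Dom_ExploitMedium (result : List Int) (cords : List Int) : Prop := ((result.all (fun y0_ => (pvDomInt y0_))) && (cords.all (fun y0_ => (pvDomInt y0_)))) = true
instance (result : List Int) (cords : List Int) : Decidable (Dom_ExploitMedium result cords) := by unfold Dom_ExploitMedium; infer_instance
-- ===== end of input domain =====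

-- B replaces A's stateful times/p toggle machine with a stateless positional test (keep index i iff i % 32 < 17): simpler decomposition, same cost.
-- ===== PORT A =====
def mapBoardA (value : Int) : String :=
  if value = 143 then "B" else if value = 15 then "X" else "?"

def loopA (times : Int) (p : Bool) (board : List String) : List Int → List String
  | [] => board
  | x :: xs =>
    let t1 : Int := if times = 17 ∧ p = true then 0 else if times = 15 ∧ p = false then 0 else times
    let p1 : Bool := if times = 17 ∧ p = true then false else if times = 15 ∧ p = false then true else p
    let b1 : List String :=
      if p1 = true then (if mapBoardA x ≠ "?" then board ++ [mapBoardA x] else board) else board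
    loopA (t1 + 1) p1 b1 xs

def ExploitMedium (result : List Int) (_cords : List Int) : List String :=
  loopA 0 true [] result

-- ===== PORT B =====
def mapBoardB (value : Int) : String :=
  if value = 143 then "B" else if value = 15 then "X" else "?"

def loopB (i : Nat) (board : List String) : List Int → List String
  | [] => board
  | x :: xs =>
    let b1 : List String :=
      if i % 32 < 17 then
        (let m := mapBoardB x; if m ≠ "?" then board ++ [m] else board)
      else board
    loopB (i + 1) b1 xs

def ExploitMedium_alt (result : List Int) (_cords : List Int) : List String :=
  loopB 0 [] result

-- ===== PRECONDITION & SPEC =====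
def Spec_ExploitMedium (result : List Int) (cords : List Int) (out : List String) : Prop := out = ExploitMedium_alt result cords
instance (result : List Int) (cords : List Int) (out : List String) : Decidable (Spec_ExploitMedium result cords out) := by unfold Spec_ExploitMedium; infer_instance

-- ===== CLAIM (what is proved, stated in full; the proofs are below) =====
def Claim_equal_ExploitMedium : Prop := ∀ (result : List Int) (cords : List Int), Dom_ExploitMedium result cords → Spec_ExploitMedium result cords (ExploitMedium result cords)

-- ===== LEMMAS AND PROOFS =====

-- Invariant: before processing the element at index i, A's (times, p) state is determined by i % 32
-- (with one extra shape at i % 32 = 0, reached after a full 32-period).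
def RelEM (i : Nat) (times : Int) (p : Bool) : Prop :=
  (i % 32 ≤ 17 ∧ times = (i % 32 : Nat) ∧ p = true) ∨
  (18 ≤ i % 32 ∧ times = ((i % 32 : Nat) : Int) - 17 ∧ p = false) ∨
  (i % 32 = 0 ∧ times = 15 ∧ p = false)

theorem loop_eq (xs : List Int) : ∀ (i : Nat) (times : Int) (p : Bool) (board : List String),
    RelEM i times p → loopA times p board xs = loopB i board xs := by
  induction xs with
  | nil => intro i times p board _; rfl
  | cons x xs ih =>
    intro i times p board hrel
    have hmap : mapBoardA = mapBoardB := rfl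
    rcases hrel with ⟨h1, ht, hp⟩ | ⟨h1, ht, hp⟩ | ⟨h1, ht, hp⟩ <;> subst hp <;> subst ht <;>
      simp only [loopA, loopB, hmap, and_true, Bool.true_eq_false, Bool.false_eq_true, and_false,
        if_false, if_true] <;> split_ifs <;>
      first
        | omega
        | (exfalso; omega)
        | (exact absurd rfl (by assumption : ¬ true = true))
        | (apply ih; unfold RelEM;
           by_cases h31 : i % 32 = 31 <;>
           first
             | (left; refine ⟨by omega, by push_cast; omega, rfl⟩)
             | (right; left; refine ⟨by omega, by push_cast; omega, rfl⟩)
             | (right; right; refine ⟨by omega, by push_cast; omega, rfl⟩))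

-- ===== VERDICT (by name: the statement is the Claim_ definition above) =====
theorem ExploitMedium_spec : Claim_equal_ExploitMedium := by
  intro result cords _
  unfold Spec_ExploitMedium ExploitMedium ExploitMedium_alt
  apply loop_eq
  unfold RelEM
  left
  exact ⟨by omega, rfl, rfl⟩
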